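-- pv_equiv track=rewrite | github.com/Amol2709/DSA | Arrays/sum_of_AllSumMatrices.py | solve
-- ===== SOURCE A (Python) =====
-- def solve(A):
--     ans=0
--     row_=len(A)
--     col_=len(A[0])
--     for i in range(0,len(A)):
--         for j in range(0,len(A[0])):
--             ans= ans+A[i][j]*(i+1)*(row_-i)*(j+1)*(col_-j)
--     return ans
-- ===== SOURCE B (Python) =====
-- def solve(A):
--     row_ = len(A)
--     col_ = len(A[0])
--     R = []
--     for row in A:
--         S = sum(row[:col_])
--         acc = 0
--         for j in range(col_):
--             acc += (col_ - 2 * j) * S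
--             S -= row[j]
--         R.append(acc)
--     T = sum(R)
--     total = 0
--     for i in range(row_):
--         total += (row_ - 2 * i) * T
--         T -= R[i]
--     return total
-- ===== Notes on version B (the rewrite author's own statement) =====
-- stated objective: alternative
-- what changed: Replaces A's per-cell five-factor weight product by a telescoping suffix-sum scheme: each weight (j+1)*(m-j) is the partial sum of the linear coefficients (m-2t), so B keeps a running sum S of the remaining row entries and accumulates (m-2j)*S per step, first along each row and then along the list of row values.
-- outside the precondition, e.g. on solve([]): A raises IndexError, B raises IndexError; on solve([[1, 2], [3]]): A raises IndexError, B raises IndexError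
import Mathlib
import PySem

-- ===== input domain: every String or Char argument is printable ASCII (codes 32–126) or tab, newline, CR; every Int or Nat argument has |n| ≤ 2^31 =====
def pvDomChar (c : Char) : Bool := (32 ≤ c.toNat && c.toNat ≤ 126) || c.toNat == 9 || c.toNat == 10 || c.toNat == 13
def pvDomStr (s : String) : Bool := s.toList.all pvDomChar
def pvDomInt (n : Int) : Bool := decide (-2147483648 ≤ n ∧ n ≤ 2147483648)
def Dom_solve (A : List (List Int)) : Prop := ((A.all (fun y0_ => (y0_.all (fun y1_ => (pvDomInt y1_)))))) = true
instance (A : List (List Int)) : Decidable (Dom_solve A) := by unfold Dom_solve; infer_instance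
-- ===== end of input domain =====

-- B replaces A's per-cell five-factor weight products by a suffix-sum scheme: each weight
-- (j+1)*(m-j) is telescoped into running partial sums with linear coefficients (m-2j),
-- applied first along each row and then along the column of row values (objective: alternative).

-- ===== PORT A =====
-- flat double loop, ans += A[i][j]*(i+1)*(row_-i)*(j+1)*(col_-j)
def solve (A : List (List Int)) : Int :=
  let row_ : Int := A.length
  let col_ : Int := (PySem.List.pyGetD A 0 []).length
  (PySem.List.pyRange 0 (A.length : Int)).foldl (fun ans i =>
    (PySem.List.pyRange 0 ((PySem.List.pyGetD A 0 []).length : Int)).foldl (fun ans j =>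
      ans + PySem.List.pyGetD (PySem.List.pyGetD A i []) j 0 * (i + 1) * (row_ - i) * (j + 1) * (col_ - j)) ans) 0

-- ===== PORT B =====
-- per row: S = sum(row[:col_]); acc += (col_-2j)*S; S -= row[j]
def rowVal (col_ : Int) (row : List Int) : Int :=
  ((PySem.List.pyRange 0 col_).foldl (fun (p : Int × Int) j =>
      (p.1 - PySem.List.pyGetD row j 0, p.2 + (col_ - 2 * j) * p.1))
    ((PySem.List.slice row none (some col_)).sum, 0)).2

def solve_alt (A : List (List Int)) : Int :=
  let row_ : Int := A.length
  let col_ : Int := (PySem.List.pyGetD A 0 []).length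
  let R : List Int := A.map (rowVal col_)
  ((PySem.List.pyRange 0 row_).foldl (fun (p : Int × Int) i =>
      (p.1 - PySem.List.pyGetD R i 0, p.2 + (row_ - 2 * i) * p.1))
    (R.sum, 0)).2

-- ===== PRECONDITION & SPEC =====
-- Pre_ excludes exactly the inputs where Python A raises IndexError: empty A (A[0]) and
-- matrices with a row shorter than row 0 (A[i][j] out of range).
def Pre_solve (A : List (List Int)) : Prop :=
  A ≠ [] ∧ ∀ r ∈ A, (A.headD []).length ≤ r.length
instance (A : List (List Int)) : Decidable (Pre_solve A) := by unfold Pre_solve; infer_instance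
def pvWitness_solve : List (List Int) := [[1, 2], [3, 4]]
def Spec_solve (A : List (List Int)) (out : Int) : Prop := out = solve_alt A
instance (A : List (List Int)) (out : Int) : Decidable (Spec_solve A out) := by unfold Spec_solve; infer_instance

-- ===== CLAIM (what is proved, stated in full; the proofs are below) =====
def Claim_equal_solve : Prop := ∀ (A : List (List Int)), Dom_solve A → Pre_solve A → Spec_solve A (solve A)

-- ===== LEMMAS AND PROOFS =====

-- linear-coefficient Gauss sum
theorem sum_lin (k : Nat) (c : Int) :
    (∑ j ∈ Finset.range k, (c - 2 * (j : Int))) = k * c - k * ((k : Int) - 1) := by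
  induction k with
  | zero => simp
  | succ k ih => rw [Finset.sum_range_succ, ih]; push_cast; ring

-- state of the stage fold after range m: (S0 - prefix sums, accumulated weighted suffix terms)
theorem stage_pair (m : Nat) (g : Nat → Int) (c S0 a0 : Int) :
    ((List.range m).foldl (fun (p : Int × Int) j =>
        (p.1 - g j, p.2 + (c - 2 * (j : Int)) * p.1)) (S0, a0))
      = (S0 - ∑ u ∈ Finset.range m, g u,
         a0 + ∑ j ∈ Finset.range m, (c - 2 * (j : Int)) * (S0 - ∑ u ∈ Finset.range j, g u)) := by
  induction m with
  | zero => simp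
  | succ m ih =>
    rw [List.range_succ, List.foldl_append, ih]
    simp [Finset.sum_range_succ]
    constructor <;> ring

-- double-sum exchange: weighted suffix sums equal per-element (u+1)(c-u) weights
theorem swap_sum (m : Nat) (g : Nat → Int) (c : Int) :
    (∑ j ∈ Finset.range m, (c - 2 * (j : Int)) *
        ((∑ u ∈ Finset.range m, g u) - ∑ u ∈ Finset.range j, g u))
      = ∑ u ∈ Finset.range m, g u * (((u : Int) + 1) * (c - u)) := by
  have hfilter1 : ∀ j : Nat, Finset.filter (fun u => j ≤ u) (Finset.range m) = Finset.Ico j m := by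
    intro j; ext x; simp [Finset.mem_filter, Finset.mem_Ico, Finset.mem_range]; omega
  have h1 : ∀ j ∈ Finset.range m,
      (c - 2 * (j : Int)) * ((∑ u ∈ Finset.range m, g u) - ∑ u ∈ Finset.range j, g u)
        = ∑ u ∈ Finset.range m, (if j ≤ u then (c - 2 * (j : Int)) * g u else 0) := by
    intro j hj
    have hjm : j ≤ m := le_of_lt (Finset.mem_range.mp hj)
    rw [← Finset.sum_Ico_eq_sub _ hjm, Finset.mul_sum, ← hfilter1 j, Finset.sum_filter]
  rw [Finset.sum_congr rfl h1, Finset.sum_comm]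
  refine Finset.sum_congr rfl ?_
  intro u hu
  have hum := Finset.mem_range.mp hu
  have hfilter2 : Finset.filter (fun j => j ≤ u) (Finset.range m) = Finset.range (u + 1) := by
    ext x; simp [Finset.mem_filter, Finset.mem_range]; omega
  rw [← Finset.sum_filter, hfilter2, ← Finset.sum_mul, sum_lin]
  push_cast; ring

theorem stage_result (m : Nat) (g : Nat → Int) (c : Int) :
    ((List.range m).foldl (fun (p : Int × Int) j =>
        (p.1 - g j, p.2 + (c - 2 * (j : Int)) * p.1)) (∑ u ∈ Finset.range m, g u, 0)).2
      = ∑ u ∈ Finset.range m, g u * (((u : Int) + 1) * (c - u)) := by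
  rw [stage_pair]; simpa using swap_sum m g c

-- take-prefix sum as a range sum
theorem take_sum (row : List Int) (m : Nat) (h : m ≤ row.length) :
    (row.take m).sum = ∑ u ∈ Finset.range m, row.getD u 0 := by
  induction row generalizing m with
  | nil =>
    simp only [List.length_nil, Nat.le_zero] at h
    subst h; simp
  | cons x xs ih =>
    cases m with
    | zero => simp
    | succ m =>
      rw [Finset.sum_range_succ']
      simp only [List.length_cons, Nat.succ_le_succ_iff] at h
      simp [ih m h, add_comm]

theorem list_sum_eq_range (l : List Int) :
    l.sum = ∑ u ∈ Finset.range l.length, l.getD u 0 := by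
  simpa using take_sum l l.length le_rfl

-- ((List.range n).map f).sum as a Finset.range sum
theorem map_range_sum (n : Nat) (f : Nat → Int) :
    ((List.range n).map f).sum = ∑ u ∈ Finset.range n, f u := by
  induction n with
  | zero => simp
  | succ n ih => rw [List.range_succ, Finset.sum_range_succ, ← ih]; simp

-- row stage: rowVal computes the (j+1)(m-j)-weighted row sum
theorem rowVal_eq (row : List Int) (m : Nat) (h : m ≤ row.length) :
    rowVal (m : Int) row
      = ∑ j ∈ Finset.range m, row.getD j 0 * (((j : Int) + 1) * ((m : Int) - j)) := by
  unfold rowVal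
  rw [PySem.List.slice_to_natCast, take_sum row m h, PySem.List.pyRange_zero_natCast,
    List.foldl_map]
  simp only [PySem.List.pyGetD_natCast]
  exact stage_result m (fun u => row.getD u 0) (m : Int)

-- A's double loop as a double range sum
theorem solveA_eq (A : List (List Int)) :
    solve A = ∑ k ∈ Finset.range A.length,
      ∑ j ∈ Finset.range (PySem.List.pyGetD A 0 []).length,
        (A.getD k []).getD j 0 * ((k : Int) + 1) * ((A.length : Int) - k) *
          ((j : Int) + 1) * (((PySem.List.pyGetD A 0 []).length : Int) - j) := by
  unfold solve
  simp only [PySem.List.foldl_add, PySem.List.pyRange_zero_natCast, List.map_map,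
    Function.comp_def, PySem.List.pyGetD_natCast, zero_add, map_range_sum]

-- B's outer stage as a range sum over row values
theorem solveAlt_eq (A : List (List Int)) :
    solve_alt A = ∑ k ∈ Finset.range A.length,
      (A.map (rowVal ((PySem.List.pyGetD A 0 []).length : Int))).getD k 0 *
        (((k : Int) + 1) * ((A.length : Int) - k)) := by
  unfold solve_alt
  dsimp only
  rw [PySem.List.pyRange_zero_natCast, List.foldl_map]
  simp only [PySem.List.pyGetD_natCast]
  have hlen : (A.map (rowVal ((PySem.List.pyGetD A 0 []).length : Int))).length = A.length := by
    simp
  rw [list_sum_eq_range, hlen]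
  exact stage_result A.length
    (fun k => (A.map (rowVal ((PySem.List.pyGetD A 0 []).length : Int))).getD k 0) (A.length : Int)

-- ===== VERDICT (by name: the statement is the Claim_ definition above) =====
theorem solve_spec : Claim_equal_solve := by
  intro A _ hpre
  obtain ⟨hne, hrow⟩ := hpre
  have hA0 : PySem.List.pyGetD A 0 [] = A.headD [] := by
    cases A with
    | nil => exact absurd rfl hne
    | cons a as => simp [PySem.List.pyGetD, PySem.List.pyGet?, PySem.List.pyIdx?]
  unfold Spec_solve
  rw [solveA_eq, solveAlt_eq]
  refine Finset.sum_congr rfl ?_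
  intro k hk
  have hkn : k < A.length := Finset.mem_range.mp hk
  have hAk : A.getD k [] = A[k] := List.getD_eq_getElem A [] hkn
  have hmem : A[k] ∈ A := List.getElem_mem hkn
  have hmle : (PySem.List.pyGetD A 0 []).length ≤ (A.getD k []).length := by
    rw [hA0, hAk]; exact hrow _ hmem
  have hgetR : (A.map (rowVal ((PySem.List.pyGetD A 0 []).length : Int))).getD k 0
      = rowVal ((PySem.List.pyGetD A 0 []).length : Int) (A.getD k []) := by
    rw [hAk, List.getD_eq_getElem _ 0 (by simpa using hkn), List.getElem_map]
  rw [hgetR, rowVal_eq _ _ hmle, Finset.sum_mul]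
  refine Finset.sum_congr rfl ?_
  intro j hj
  ring
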